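-- pv_equiv track=rewrite | github.com/Inveterate-Enthusiast/LeetCode | Python/930. Binary Subarrays With Sum.py | numSubarraysWithSum3
-- ===== SOURCE A (Python) =====
-- def numSubarraysWithSum3(nums: list[int], goal: int) -> int:
--     OurNumber = 0
--     OurCurrentSum = 0
--     OurDict = {0:1}
--
--     for num in nums:
--         OurCurrentSum += num
--         if OurCurrentSum - goal in OurDict:
--             OurNumber += OurDict[OurCurrentSum - goal]
--         OurDict[OurCurrentSum] = OurDict.get(OurCurrentSum, 0) + 1
--     return OurNumber
-- ===== SOURCE B (Python) =====
-- def numSubarraysWithSum3(nums: list[int], goal: int) -> int: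
--     # Direct enumeration: subarrays summing to goal = for each suffix, the
--     # nonempty prefixes of that suffix that sum to goal.  No dictionary.
--     total = 0
--     suffix = nums
--     while suffix:
--         s = 0
--         for x in suffix:
--             s += x
--             if s == goal:
--                 total += 1
--         suffix = suffix[1:]
--     return total
-- ===== Notes on version B (the rewrite author's own statement) =====
-- stated objective: simpler
-- what changed: Replaces the one-pass prefix-sum frequency dictionary with a direct enumeration that, for each suffix of nums, scans its prefixes and counts running sums equal to goal — no dictionary or prefix-sum bookkeeping at all, at the cost of quadratic time.
import Mathlib
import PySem

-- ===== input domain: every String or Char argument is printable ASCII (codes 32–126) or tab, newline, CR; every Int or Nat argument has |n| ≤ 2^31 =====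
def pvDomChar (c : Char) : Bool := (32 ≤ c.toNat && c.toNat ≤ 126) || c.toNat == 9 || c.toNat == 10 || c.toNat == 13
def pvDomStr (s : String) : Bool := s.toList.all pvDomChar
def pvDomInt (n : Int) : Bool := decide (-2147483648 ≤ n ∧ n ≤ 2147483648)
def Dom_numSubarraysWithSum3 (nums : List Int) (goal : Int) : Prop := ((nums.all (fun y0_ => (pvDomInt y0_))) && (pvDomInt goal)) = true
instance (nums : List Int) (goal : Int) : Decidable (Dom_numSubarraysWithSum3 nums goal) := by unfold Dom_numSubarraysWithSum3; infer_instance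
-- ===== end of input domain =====

-- B replaces A's prefix-sum frequency dictionary with a direct (quadratic) scan
-- of every suffix's prefixes; equivalence is proved for all Int inputs.

-- ===== PORT A =====
-- A's loop state: (OurNumber, OurCurrentSum, OurDict)
def numSubarraysWithSum3 (nums : List Int) (goal : Int) : Int :=
  (nums.foldl
    (fun (st : Int × Int × PySem.Dict Int Int) num =>
      let curSum := st.2.1 + num
      let number :=
        if (st.2.2.get? (curSum - goal)).isSome
        then st.1 + (st.2.2.get? (curSum - goal)).getD 0
        else st.1
      (number, curSum, st.2.2.insert curSum (st.2.2.getD curSum 0 + 1)))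
    (0, 0, PySem.Dict.ofList [(0, 1)])).1

-- ===== PORT B =====
-- inner 'for x in suffix' loop of Source B: running sum / hit counter
def pvCountPref (goal : Int) (suffix : List Int) : Int :=
  (suffix.foldl
    (fun (st : Int × Int) x =>
      let s := st.1 + x
      (s, if s = goal then st.2 + 1 else st.2))
    (0, 0)).2

-- outer 'while suffix' loop of Source B: drop the head each iteration
def pvSuffLoop (goal : Int) : List Int → Int → Int
  | [], total => total
  | x :: xs, total => pvSuffLoop goal xs (total + pvCountPref goal (x :: xs))

def numSubarraysWithSum3_alt (nums : List Int) (goal : Int) : Int :=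
  pvSuffLoop goal nums 0

-- ===== PRECONDITION & SPEC =====
def Spec_numSubarraysWithSum3 (nums : List Int) (goal : Int) (out : Int) : Prop := out = numSubarraysWithSum3_alt nums goal
instance (nums : List Int) (goal : Int) (out : Int) : Decidable (Spec_numSubarraysWithSum3 nums goal out) := by unfold Spec_numSubarraysWithSum3; infer_instance

-- ===== CLAIM (what is proved, stated in full; the proofs are below) =====
def Claim_equal_numSubarraysWithSum3 : Prop := ∀ (nums : List Int) (goal : Int), Dom_numSubarraysWithSum3 nums goal → Spec_numSubarraysWithSum3 nums goal (numSubarraysWithSum3 nums goal)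

-- ===== LEMMAS AND PROOFS =====

-- nonempty-prefix sums of a list
def pvNps : List Int → List Int
  | [] => []
  | x :: xs => x :: (pvNps xs).map (fun q => x + q)

-- all prefix sums (including the empty prefix)
def pvPS (xs : List Int) : List Int := 0 :: pvNps xs

-- number of ordered pairs i < j in ps with ps[j] - ps[i] = g
def pvPairCount : List Int → Int → Int
  | [], _ => 0
  | p :: rest, g => (rest.count (p + g) : Int) + pvPairCount rest g

theorem pvNps_append (ys : List Int) (x : Int) :
    pvNps (ys ++ [x]) = pvNps ys ++ [ys.sum + x] := by
  induction ys with
  | nil => simp [pvNps]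
  | cons y ys ih =>
      simp [pvNps, ih, List.sum_cons, add_assoc]

theorem pvPairCount_shift (L : List Int) (g c : Int) :
    pvPairCount (L.map (fun q => c + q)) g = pvPairCount L g := by
  induction L with
  | nil => simp [pvPairCount]
  | cons p rest ih =>
      simp only [List.map_cons, pvPairCount, ih]
      congr 1
      have : c + p + g = c + (p + g) := by ring
      rw [this, List.count_map_of_injective rest (fun q => c + q) (add_right_injective c)]

theorem pvPairCount_append (L : List Int) (q g : Int) :
    pvPairCount (L ++ [q]) g = pvPairCount L g + (L.count (q - g) : Int) := by
  induction L with
  | nil => simp [pvPairCount]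
  | cons p rest ih =>
      simp only [List.cons_append, pvPairCount, ih, List.count_append]
      have h1 : ([q].count (p + g) : Int) = if p = q - g then 1 else 0 := by
        by_cases h : p = q - g
        · subst h; simp [show q - g + g = q by ring]
        · have : q ≠ p + g := by omega
          simp [this, h]
      have h2 : ((p :: rest).count (q - g) : Int) =
          (rest.count (q - g) : Int) + (if p = q - g then 1 else 0) := by
        by_cases h : p = q - g <;> simp [h]
      push_cast
      push_cast at h1 h2
      rw [h2]
      omega

-- the A-side fold invariant: number = pair count, sum = list sum, dict = counter of prefix sums
theorem pvFoldA_inv (g : Int) (ys : List Int) :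
    ∃ d : PySem.Dict Int Int,
      (ys.foldl
        (fun (st : Int × Int × PySem.Dict Int Int) num =>
          let curSum := st.2.1 + num
          let number :=
            if (st.2.2.get? (curSum - g)).isSome
            then st.1 + (st.2.2.get? (curSum - g)).getD 0
            else st.1
          (number, curSum, st.2.2.insert curSum (st.2.2.getD curSum 0 + 1)))
        (0, 0, PySem.Dict.ofList [(0, 1)]))
      = (pvPairCount (pvPS ys) g, ys.sum, d)
      ∧ ∀ v : Int, d.getD v 0 = ((pvPS ys).count v : Int) := by
  induction ys using List.reverseRecOn with
  | nil =>
      refine ⟨PySem.Dict.ofList [(0, 1)], ?_, ?_⟩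
      · simp [pvPS, pvNps, pvPairCount]
      · intro v
        have h01 : PySem.Dict.ofList [((0:Int), (1:Int))] = PySem.Dict.empty.insert 0 1 := by rfl
        rw [h01, PySem.Dict.getD_insert]
        by_cases h : v = 0
        · simp [h, pvPS, pvNps]
        · have h' : ¬ (0 : Int) = v := by omega
          simp [h, h', PySem.Dict.getD_empty, pvPS, pvNps]
  | append_singleton ys x ih =>
      obtain ⟨d, hfold, hcnt⟩ := ih
      rw [List.foldl_append, hfold]
      refine ⟨d.insert (ys.sum + x) (d.getD (ys.sum + x) 0 + 1), ?_, ?_⟩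
      · simp only [List.foldl_cons, List.foldl_nil]
        have hnum :
            (if (d.get? (ys.sum + x - g)).isSome
             then pvPairCount (pvPS ys) g + (d.get? (ys.sum + x - g)).getD 0
             else pvPairCount (pvPS ys) g)
            = pvPairCount (pvPS ys) g + d.getD (ys.sum + x - g) 0 := by
          by_cases h : (d.get? (ys.sum + x - g)).isSome
          · simp [h, PySem.Dict.getD_eq_get?_getD]
          · have hnone : d.get? (ys.sum + x - g) = none := by
              cases hc : d.get? (ys.sum + x - g) with
              | none => rfl
              | some v => rw [hc] at h; simp at h
            simp [PySem.Dict.getD_eq_get?_getD, hnone]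
        have hps : pvPS (ys ++ [x]) = pvPS ys ++ [ys.sum + x] := by
          simp [pvPS, pvNps_append]
        simp only [hnum, hcnt, hps, pvPairCount_append]
        simp [List.sum_append]
      · intro v
        rw [PySem.Dict.getD_insert]
        have hps : pvPS (ys ++ [x]) = pvPS ys ++ [ys.sum + x] := by
          simp [pvPS, pvNps_append]
        rw [hps, List.count_append]
        by_cases h : v = ys.sum + x
        · subst h
          simp [hcnt]
        · have : ys.sum + x ≠ v := fun hh => h hh.symm
          simp [h, hcnt, this]

theorem pvA_eq (nums : List Int) (g : Int) :
    numSubarraysWithSum3 nums g = pvPairCount (pvPS nums) g := by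
  obtain ⟨d, hfold, -⟩ := pvFoldA_inv g nums
  unfold numSubarraysWithSum3
  rw [hfold]

-- B-side inner loop characterisation
theorem pvCountPrefFold (g : Int) (ys : List Int) :
    ∀ s c : Int,
      (ys.foldl
        (fun (st : Int × Int) x =>
          let t := st.1 + x
          (t, if t = g then st.2 + 1 else st.2)) (s, c)).2
      = c + (((pvNps ys).countP (fun q => s + q == g)) : Int) := by
  induction ys with
  | nil => intro s c; simp [pvNps]
  | cons x t ih =>
      intro s c
      simp only [List.foldl_cons]
      rw [ih]
      have hfun : ((fun q => s + q == g) ∘ fun q => x + q) = (fun q => s + x + q == g) := by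
        funext q
        simp [Function.comp, add_assoc]
      have hsplit : (pvNps (x :: t)).countP (fun q => s + q == g)
          = (pvNps t).countP (fun q => s + x + q == g) + (if s + x == g then 1 else 0) := by
        simp only [pvNps, List.countP_cons, List.countP_map, hfun]
      rw [hsplit]
      by_cases h : s + x = g
      · simp [h]
        ring
      · simp [h]

theorem pvCountPref_eq (g : Int) (ys : List Int) :
    pvCountPref g ys = ((pvNps ys).count g : Int) := by
  unfold pvCountPref
  rw [pvCountPrefFold]
  simp [List.count]

theorem pvSuffLoop_eq (g : Int) (xs : List Int) :
    ∀ total : Int, pvSuffLoop g xs total = total + pvPairCount (pvPS xs) g := by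
  induction xs with
  | nil => intro total; simp [pvSuffLoop, pvPS, pvNps, pvPairCount]
  | cons x xs ih =>
      intro total
      rw [pvSuffLoop, ih, pvCountPref_eq]
      have hmap : pvNps (x :: xs) = (pvPS xs).map (fun q => x + q) := by
        simp [pvNps, pvPS]
      have hpc : pvPairCount (pvPS (x :: xs)) g
          = ((pvNps (x :: xs)).count (0 + g) : Int) + pvPairCount (pvNps (x :: xs)) g := by
        simp [pvPS, pvPairCount]
      rw [hpc, hmap, pvPairCount_shift]
      simp [zero_add]
      ring

theorem pvB_eq (nums : List Int) (g : Int) :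
    numSubarraysWithSum3_alt nums g = pvPairCount (pvPS nums) g := by
  unfold numSubarraysWithSum3_alt
  rw [pvSuffLoop_eq]
  ring

-- ===== VERDICT (by name: the statement is the Claim_ definition above) =====
theorem numSubarraysWithSum3_spec : Claim_equal_numSubarraysWithSum3 := by
  intro nums goal _
  unfold Spec_numSubarraysWithSum3
  rw [pvA_eq, pvB_eq]
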